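-- pv_equiv track=rewrite | github.com/scey26/srdualglow | LEGACY/210710/utils.py | calc_inp_shapes
-- ===== SOURCE A (Python) =====
-- def calc_z_shapes(n_channel, image_size, n_block):
--     # calculates shapes of z's after SPLIT operation (after Block operations) - e.g. channels: 6, 12, 24, 96
--     z_shapes = []
--     for i in range(n_block - 1):
--         image_size = (image_size[0] // 2, image_size[1] // 2)
--         n_channel = n_channel * 2
--
--         shape = (n_channel, *image_size)
--         z_shapes.append(shape)
--
--     # for the very last block where we have no split operation
--     image_size = (image_size[0] // 2, image_size[1] // 2)
--     shape = (n_channel * 4, *image_size)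
--     z_shapes.append(shape)
--     return z_shapes
--
-- def calc_inp_shapes(n_channels, image_size, n_blocks):
--     # calculates z shapes (inputs) after SQUEEZE operation (before Block operations) - e.g. channels: 12, 24, 48, 96
--     z_shapes = calc_z_shapes(n_channels, image_size, n_blocks)
--     input_shapes = []
--     for i in range(len(z_shapes)):
--         if i < len(z_shapes) - 1:
--             channels = z_shapes[i][0] * 2
--             input_shapes.append((channels, z_shapes[i][1], z_shapes[i][2]))
--         else:
--             input_shapes.append((z_shapes[i][0], z_shapes[i][1], z_shapes[i][2]))
--     return input_shapes
-- ===== SOURCE B (Python) =====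
-- def calc_inp_shapes(n_channels, image_size, n_blocks):
--     # single pass: running channel/size state, append each block's input shape directly
--     input_shapes = []
--     n_channel = n_channels
--     for i in range(n_blocks - 1):
--         image_size = (image_size[0] // 2, image_size[1] // 2)
--         n_channel = n_channel * 2
--         input_shapes.append((n_channel * 2, image_size[0], image_size[1]))
--     image_size = (image_size[0] // 2, image_size[1] // 2)
--     input_shapes.append((n_channel * 4, image_size[0], image_size[1]))
--     return input_shapes
-- ===== Notes on version B (the rewrite author's own statement) =====
-- stated objective: simpler
-- what changed: Replaced A's two sequential passes (helper building z_shapes, then an index loop re-reading it to double all but the last channel) by one self-contained loop that maintains running channel/size state and emits each input shape directly, with no intermediate list and no helper.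
import Mathlib
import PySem

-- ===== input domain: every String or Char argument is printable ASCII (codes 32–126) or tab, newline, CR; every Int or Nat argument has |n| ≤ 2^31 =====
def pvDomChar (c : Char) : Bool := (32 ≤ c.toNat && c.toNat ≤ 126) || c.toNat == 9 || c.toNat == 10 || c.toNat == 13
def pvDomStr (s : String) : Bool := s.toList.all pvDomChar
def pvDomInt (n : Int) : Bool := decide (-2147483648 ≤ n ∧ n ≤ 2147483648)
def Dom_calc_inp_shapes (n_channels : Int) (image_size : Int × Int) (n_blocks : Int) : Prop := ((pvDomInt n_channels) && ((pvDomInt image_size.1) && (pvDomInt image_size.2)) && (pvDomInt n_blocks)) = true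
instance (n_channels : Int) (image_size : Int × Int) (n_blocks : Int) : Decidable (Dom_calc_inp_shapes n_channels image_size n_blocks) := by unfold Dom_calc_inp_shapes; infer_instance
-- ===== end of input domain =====

-- B merges A's two passes (helper z_shapes list + index loop doubling all but the last channel)
-- into one self-contained loop over the blocks; same return value, no speed claim.

-- ===== PORT A =====
def calc_z_shapes (n_channel : Int) (image_size : Int × Int) (n_block : Int) : List (Int × Int × Int) :=
  let s := (PySem.List.pyRange 0 (n_block - 1)).foldl
    (fun (st : (Int × Int) × Int × List (Int × Int × Int)) _ =>
      let img := (PySem.Int.floordiv st.1.1 2, PySem.Int.floordiv st.1.2 2)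
      let nc := st.2.1 * 2
      (img, nc, st.2.2 ++ [(nc, img.1, img.2)]))
    (image_size, n_channel, ([] : List (Int × Int × Int)))
  let img := (PySem.Int.floordiv s.1.1 2, PySem.Int.floordiv s.1.2 2)
  s.2.2 ++ [(s.2.1 * 4, img.1, img.2)]

def calc_inp_shapes (n_channels : Int) (image_size : Int × Int) (n_blocks : Int) : List (Int × Int × Int) :=
  let z := calc_z_shapes n_channels image_size n_blocks
  -- z[i] is always in range here; .getD only totalises the lookup
  (PySem.List.pyRange 0 (PySem.List.len z)).foldl
    (fun (acc : List (Int × Int × Int)) i =>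
      if i < PySem.List.len z - 1 then
        let zi := PySem.List.pyGetD z i (0, 0, 0)
        acc ++ [(zi.1 * 2, zi.2.1, zi.2.2)]
      else
        let zi := PySem.List.pyGetD z i (0, 0, 0)
        acc ++ [zi])
    []

-- ===== PORT B =====
def calc_inp_shapes_alt (n_channels : Int) (image_size : Int × Int) (n_blocks : Int) : List (Int × Int × Int) :=
  let s := (PySem.List.pyRange 0 (n_blocks - 1)).foldl
    (fun (st : (Int × Int) × Int × List (Int × Int × Int)) _ =>
      let img := (PySem.Int.floordiv st.1.1 2, PySem.Int.floordiv st.1.2 2)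
      let nc := st.2.1 * 2
      (img, nc, st.2.2 ++ [(nc * 2, img.1, img.2)]))
    (image_size, n_channels, ([] : List (Int × Int × Int)))
  let img := (PySem.Int.floordiv s.1.1 2, PySem.Int.floordiv s.1.2 2)
  s.2.2 ++ [(s.2.1 * 4, img.1, img.2)]

-- ===== PRECONDITION & SPEC =====
def Spec_calc_inp_shapes (n_channels : Int) (image_size : Int × Int) (n_blocks : Int) (out : List (Int × Int × Int)) : Prop := out = calc_inp_shapes_alt n_channels image_size n_blocks
instance (n_channels : Int) (image_size : Int × Int) (n_blocks : Int) (out : List (Int × Int × Int)) : Decidable (Spec_calc_inp_shapes n_channels image_size n_blocks out) := by unfold Spec_calc_inp_shapes; infer_instance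

-- ===== CLAIM (what is proved, stated in full; the proofs are below) =====
def Claim_equal_calc_inp_shapes : Prop := ∀ (n_channels : Int) (image_size : Int × Int) (n_blocks : Int), Dom_calc_inp_shapes n_channels image_size n_blocks → Spec_calc_inp_shapes n_channels image_size n_blocks (calc_inp_shapes n_channels image_size n_blocks)

-- ===== LEMMAS AND PROOFS =====

-- ===== VERDICT (by name: the statement is the Claim_ definition above) =====
-- helper (proofs only): double the channel of a shape
def pvDbl (t : Int × Int × Int) : Int × Int × Int := (t.1 * 2, t.2.1, t.2.2)

-- B's loop state equals A's helper loop state with the accumulated list mapped through pvDbl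
theorem loop_corr (l : List Int) (img : Int × Int) (nc : Int) (acc : List (Int × Int × Int)) :
    l.foldl
      (fun (st : (Int × Int) × Int × List (Int × Int × Int)) _ =>
        let img := (PySem.Int.floordiv st.1.1 2, PySem.Int.floordiv st.1.2 2)
        let nc := st.2.1 * 2
        (img, nc, st.2.2 ++ [(nc * 2, img.1, img.2)]))
      (img, nc, acc.map pvDbl) =
    ((l.foldl
      (fun (st : (Int × Int) × Int × List (Int × Int × Int)) _ =>
        let img := (PySem.Int.floordiv st.1.1 2, PySem.Int.floordiv st.1.2 2)
        let nc := st.2.1 * 2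
        (img, nc, st.2.2 ++ [(nc, img.1, img.2)]))
      (img, nc, acc)).1,
     (l.foldl
      (fun (st : (Int × Int) × Int × List (Int × Int × Int)) _ =>
        let img := (PySem.Int.floordiv st.1.1 2, PySem.Int.floordiv st.1.2 2)
        let nc := st.2.1 * 2
        (img, nc, st.2.2 ++ [(nc, img.1, img.2)]))
      (img, nc, acc)).2.1,
     ((l.foldl
      (fun (st : (Int × Int) × Int × List (Int × Int × Int)) _ =>
        let img := (PySem.Int.floordiv st.1.1 2, PySem.Int.floordiv st.1.2 2)
        let nc := st.2.1 * 2
        (img, nc, st.2.2 ++ [(nc, img.1, img.2)]))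
      (img, nc, acc)).2.2).map pvDbl) := by
  induction l generalizing img nc acc with
  | nil => simp
  | cons x xs ih =>
      simp only [List.foldl_cons]
      have : (acc.map pvDbl) ++ [(nc * 2 * 2, PySem.Int.floordiv img.1 2, PySem.Int.floordiv img.2 2)] =
          ((acc ++ [(nc * 2, PySem.Int.floordiv img.1 2, PySem.Int.floordiv img.2 2)]).map pvDbl) := by
        simp [pvDbl]
      simpa [this] using ih (PySem.Int.floordiv img.1 2, PySem.Int.floordiv img.2 2) (nc * 2)
        (acc ++ [(nc * 2, PySem.Int.floordiv img.1 2, PySem.Int.floordiv img.2 2)])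

-- A's second pass over zs ++ [a] doubles every channel except the last entry
theorem second_pass (zs : List (Int × Int × Int)) (a : Int × Int × Int) :
    (PySem.List.pyRange 0 (PySem.List.len (zs ++ [a]))).foldl
      (fun (acc : List (Int × Int × Int)) i =>
        if i < PySem.List.len (zs ++ [a]) - 1 then
          let zi := PySem.List.pyGetD (zs ++ [a]) i (0, 0, 0)
          acc ++ [(zi.1 * 2, zi.2.1, zi.2.2)]
        else
          let zi := PySem.List.pyGetD (zs ++ [a]) i (0, 0, 0)
          acc ++ [zi])
      [] = zs.map pvDbl ++ [a] := by
  have hb : (fun (acc : List (Int × Int × Int)) (i : Int) =>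
        if i < PySem.List.len (zs ++ [a]) - 1 then
          let zi := PySem.List.pyGetD (zs ++ [a]) i (0, 0, 0)
          acc ++ [(zi.1 * 2, zi.2.1, zi.2.2)]
        else
          let zi := PySem.List.pyGetD (zs ++ [a]) i (0, 0, 0)
          acc ++ [zi]) =
      fun acc i => acc ++ [if i < PySem.List.len (zs ++ [a]) - 1 then
          pvDbl (PySem.List.pyGetD (zs ++ [a]) i (0, 0, 0))
        else PySem.List.pyGetD (zs ++ [a]) i (0, 0, 0)] := by
    funext acc i; split <;> rfl
  rw [hb, PySem.List.foldl_append_singleton_eq_map, List.nil_append]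
  have hlen : PySem.List.len (zs ++ [a]) = ((zs.length + 1 : Nat) : Int) := by
    simp [PySem.List.len]
  rw [hlen, PySem.List.pyRange_zero_natCast, List.map_map]
  rw [List.range_succ, List.map_append]
  congr 1
  · have : ∀ k ∈ List.range zs.length,
        ((fun i => if i < ((zs.length + 1 : Nat) : Int) - 1 then
            pvDbl (PySem.List.pyGetD (zs ++ [a]) i (0, 0, 0))
          else PySem.List.pyGetD (zs ++ [a]) i (0, 0, 0)) ∘ fun k => ((k : Nat) : Int)) k =
        (pvDbl ∘ fun k => zs.getD k (0, 0, 0)) k := by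
      intro k hk
      rw [List.mem_range] at hk
      simp only [Function.comp]
      rw [if_pos (by push_cast; omega), PySem.List.pyGetD_natCast]
      have : (zs ++ [a]).getD k (0, 0, 0) = zs.getD k (0, 0, 0) := by
        simp [List.getD, List.getElem?_append_left hk]
      rw [this]
    rw [List.map_congr_left this, ← List.map_map]
    congr 1
    apply List.ext_getElem (by simp)
    intro i h1 h2
    simp at h2
    simp [List.getD, List.getElem?_eq_getElem h2]
  · simp only [List.map_cons, List.map_nil, Function.comp]
    rw [if_neg (by push_cast; omega), PySem.List.pyGetD_natCast]
    simp [List.getD]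

-- ===== VERDICT (by name: the statement is the Claim_ definition above) =====
theorem calc_inp_shapes_spec : Claim_equal_calc_inp_shapes := by
  intro n_channels image_size n_blocks _
  show _ = _
  have h := loop_corr (PySem.List.pyRange 0 (n_blocks - 1)) image_size n_channels []
  simp only [List.map_nil] at h
  unfold calc_inp_shapes calc_inp_shapes_alt calc_z_shapes
  simp only [h]
  exact second_pass _ _
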